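-- pv_equiv track=rewrite | github.com/mkaxiolev-max/handrail | ns_bridge/ns_bridge.py | recommend_next
-- ===== SOURCE A (Python) =====
-- def recommend_next(overall_ok: bool, failed_ops: list):
--     if overall_ok:
--         return "done"
--     classes = {f["class"] for f in failed_ops}
--     if "schema_invalid" in classes or "not_found" in classes:
--         return "inspect"
--     if "service_down" in classes or "latency_issue" in classes:
--         return "retry"
--     if "policy_denied" in classes:
--         return "stop"
--     return "inspect"
-- ===== SOURCE B (Python) =====
-- _RANK = {"schema_invalid": 0, "not_found": 0,
--          "service_down": 1, "latency_issue": 1,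
--          "policy_denied": 2}
--
-- def recommend_next(overall_ok: bool, failed_ops: list):
--     if overall_ok:
--         return "done"
--     best = 3
--     for f in failed_ops:
--         r = _RANK.get(f["class"], 3)
--         if r < best:
--             best = r
--     if best == 1:
--         return "retry"
--     if best == 2:
--         return "stop"
--     return "inspect"
-- ===== Notes on version B (the rewrite author's own statement) =====
-- stated objective: alternative
-- what changed: Replaced the set comprehension plus ordered membership-test branches by a priority table and a single min-rank reduction over failed_ops, mapping the best rank back to an action.
import Mathlib
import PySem

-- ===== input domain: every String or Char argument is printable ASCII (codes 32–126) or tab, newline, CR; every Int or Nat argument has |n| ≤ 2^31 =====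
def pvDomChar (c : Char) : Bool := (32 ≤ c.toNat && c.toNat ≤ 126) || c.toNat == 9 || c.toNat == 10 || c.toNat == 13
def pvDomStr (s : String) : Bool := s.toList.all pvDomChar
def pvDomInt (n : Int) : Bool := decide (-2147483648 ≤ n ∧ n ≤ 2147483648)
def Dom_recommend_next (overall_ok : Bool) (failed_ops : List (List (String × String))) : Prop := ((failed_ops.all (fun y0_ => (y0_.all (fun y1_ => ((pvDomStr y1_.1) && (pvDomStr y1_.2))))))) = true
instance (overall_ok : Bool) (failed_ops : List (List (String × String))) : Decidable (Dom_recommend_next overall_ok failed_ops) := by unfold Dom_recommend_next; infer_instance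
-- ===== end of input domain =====

-- B changes the decomposition: a priority table + single min-rank pass instead of a set build + ordered membership branches (objective: alternative, same cost).
-- f["class"] lookup: first match in the assoc list; the .getD "" default is only reached when the key is
-- missing, where Python raises KeyError — excluded by Pre_ below.
def pvCls (f : List (String × String)) : String := (f.lookup "class").getD ""

-- ===== PORT A =====
def recommend_next (overall_ok : Bool) (failed_ops : List (List (String × String))) : String :=
  if overall_ok then "done"
  else
    let classes : PySem.Set String := PySem.Set.ofList (failed_ops.map pvCls)
    if classes.contains "schema_invalid" || classes.contains "not_found" then "inspect"
    else if classes.contains "service_down" || classes.contains "latency_issue" then "retry"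
    else if classes.contains "policy_denied" then "stop"
    else "inspect"

-- ===== PORT B =====
-- the _RANK table of Source B, with .get's default 3 folded in
def pvRank (c : String) : Nat :=
  if c = "schema_invalid" then 0 else if c = "not_found" then 0
  else if c = "service_down" then 1 else if c = "latency_issue" then 1
  else if c = "policy_denied" then 2 else 3

def recommend_next_alt (overall_ok : Bool) (failed_ops : List (List (String × String))) : String :=
  if overall_ok then "done"
  else
    let best := failed_ops.foldl (fun b f => let r := pvRank (pvCls f); if r < b then r else b) 3
    if best = 1 then "retry" else if best = 2 then "stop" else "inspect"

-- ===== PRECONDITION & SPEC =====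
-- Pre_ excludes only inputs where A raises KeyError: ¬overall_ok with some failed op lacking a "class" key.
def Pre_recommend_next (overall_ok : Bool) (failed_ops : List (List (String × String))) : Prop :=
  overall_ok = true ∨ ∀ f ∈ failed_ops, (f.lookup "class").isSome
instance (overall_ok : Bool) (failed_ops : List (List (String × String))) : Decidable (Pre_recommend_next overall_ok failed_ops) := by unfold Pre_recommend_next; infer_instance
def pvWitness_recommend_next : Bool × (List (List (String × String))) := (false, [[("class", "service_down")]])
def Spec_recommend_next (overall_ok : Bool) (failed_ops : List (List (String × String))) (out : String) : Prop := out = recommend_next_alt overall_ok failed_ops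
instance (overall_ok : Bool) (failed_ops : List (List (String × String))) (out : String) : Decidable (Spec_recommend_next overall_ok failed_ops out) := by unfold Spec_recommend_next; infer_instance

-- ===== CLAIM (what is proved, stated in full; the proofs are below) =====
def Claim_equal_recommend_next : Prop := ∀ (overall_ok : Bool) (failed_ops : List (List (String × String))), Dom_recommend_next overall_ok failed_ops → Pre_recommend_next overall_ok failed_ops → Spec_recommend_next overall_ok failed_ops (recommend_next overall_ok failed_ops)

-- ===== LEMMAS AND PROOFS =====

-- characterization of the min-rank fold by the memberships A tests
def pvChar (cs : List String) : Nat :=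
  if "schema_invalid" ∈ cs ∨ "not_found" ∈ cs then 0
  else if "service_down" ∈ cs ∨ "latency_issue" ∈ cs then 1
  else if "policy_denied" ∈ cs then 2 else 3

lemma pvChar_cons (c : String) (cs : List String) :
    pvChar (c :: cs) = min (pvRank c) (pvChar cs) := by
  simp only [pvChar, pvRank, List.mem_cons]
  split_ifs <;> simp_all <;> tauto

lemma pvFold_char (cs : List String) :
    ∀ a, a ≤ 3 → cs.foldl (fun b c => let r := pvRank c; if r < b then r else b) a = min a (pvChar cs) := by
  induction cs with
  | nil => intro a ha; simp [pvChar]; omega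
  | cons c cs ih =>
    intro a ha
    simp only [List.foldl_cons]
    have hr : pvRank c ≤ 3 := by unfold pvRank; split_ifs <;> omega
    rw [show (let r := pvRank c; if r < a then r else a) = min (pvRank c) a by
          simp only []; split_ifs <;> omega]
    rw [ih _ (by omega), pvChar_cons]
    omega

theorem recommend_next_spec : Claim_equal_recommend_next := by
  intro ok fos _hdom hpre
  unfold Spec_recommend_next recommend_next recommend_next_alt
  cases ok with
  | true => simp
  | false =>
    simp only [Bool.false_eq_true, if_false]
    rw [show fos.foldl (fun b f => let r := pvRank (pvCls f); if r < b then r else b) 3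
          = (fos.map pvCls).foldl (fun b c => let r := pvRank c; if r < b then r else b) 3 by
        rw [List.foldl_map]]
    rw [pvFold_char _ 3 (le_refl 3)]
    have hmem : ∀ s : String,
        (PySem.Set.ofList (fos.map pvCls)).contains s = decide (s ∈ fos.map pvCls) := by
      intro s
      simp [PySem.Set.contains, PySem.Set.mem_ofList]
    simp only [hmem, pvChar]
    split_ifs <;> simp_all <;> tauto
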